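-- pv_equiv track=rewrite | github.com/Aasthaengg/IBMdataset | Python_codes/p02786/s654120268.py | solve
-- ===== SOURCE A (Python) =====
-- def solve(H: int):
--     n = 1
--     attack = 0
--     while H > 1:
--         attack += n
--         H = H // 2
--         n *= 2
--     attack += n
--     return attack
-- ===== SOURCE B (Python) =====
-- def solve(H: int):
--     # closed form: total damage is 2^bit_length(max(H,1)) - 1
--     return (1 << max(H, 1).bit_length()) - 1
-- ===== Notes on version B (the rewrite author's own statement) =====
-- stated objective: simpler
-- what changed: Replaced the halving loop that accumulates doubling attack counts with the closed form (1 << max(H,1).bit_length()) - 1.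
import Mathlib
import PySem

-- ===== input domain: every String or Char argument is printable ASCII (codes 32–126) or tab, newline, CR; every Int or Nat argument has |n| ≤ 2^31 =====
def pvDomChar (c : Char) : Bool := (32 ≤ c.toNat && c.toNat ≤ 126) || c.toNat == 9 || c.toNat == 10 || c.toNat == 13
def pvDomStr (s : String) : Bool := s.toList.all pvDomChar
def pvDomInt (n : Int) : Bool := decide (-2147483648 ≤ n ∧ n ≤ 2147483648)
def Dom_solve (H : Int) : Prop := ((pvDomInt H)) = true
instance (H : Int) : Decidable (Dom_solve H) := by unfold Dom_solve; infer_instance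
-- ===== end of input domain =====

-- B replaces A's halving loop by the closed form (1 << max(H,1).bit_length()) - 1 (simpler).

-- ===== PORT A =====
-- the while-loop of A: state (H, n, attack); decreases on H.toNat
def solveLoop (H n attack : Int) : Int :=
  if h : H > 1 then
    solveLoop (PySem.Int.floordiv H 2) (n * 2) (attack + n)
  else
    attack + n
termination_by H.toNat
decreasing_by
  have := PySem.Int.floordiv_eq_ediv_of_pos (a := H) (b := 2) (by omega)
  omega

def solve (H : Int) : Int := solveLoop H 1 0

-- ===== PORT B =====
def solve_alt (H : Int) : Int := 2 ^ (PySem.Int.bitLength (max H 1)) - 1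

-- ===== PRECONDITION & SPEC =====
def Spec_solve (H : Int) (out : Int) : Prop := out = solve_alt H
instance (H : Int) (out : Int) : Decidable (Spec_solve H out) := by unfold Spec_solve; infer_instance

-- ===== CLAIM (what is proved, stated in full; the proofs are below) =====
def Claim_equal_solve : Prop := ∀ (H : Int), Dom_solve H → Spec_solve H (solve H)

-- ===== LEMMAS AND PROOFS =====

theorem solveLoop_closed (k : Nat) :
    ∀ H : Int, H.toNat = k → 0 < H →
      ∀ n attack : Int, solveLoop H n attack = attack + n * (2 ^ PySem.Int.bitLength H - 1) := by
  induction k using Nat.strong_induction_on with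
  | _ k ih =>
    intro H hk hH n attack
    by_cases hgt : H > 1
    · rw [solveLoop, dif_pos hgt]
      have hfd := PySem.Int.floordiv_eq_ediv_of_pos (a := H) (b := 2) (by omega)
      have hpos : (0:Int) < PySem.Int.floordiv H 2 := by omega
      rw [ih (PySem.Int.floordiv H 2).toNat (by omega) _ rfl hpos,
        PySem.Int.bitLength_of_pos (n := H) (by omega), pow_succ]
      ring
    · rw [solveLoop, dif_neg hgt]
      have h1 : H = 1 := by omega
      subst h1
      have hb : PySem.Int.bitLength 1 = 1 := by decide
      rw [hb]
      ring

theorem solve_spec : Claim_equal_solve := by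
  intro H _
  unfold Spec_solve solve solve_alt
  by_cases hH : 0 < H
  · have hmax : max H 1 = H := by omega
    rw [hmax, solveLoop_closed H.toNat H rfl hH 1 0]
    ring
  · -- H ≤ 0: the loop body never runs
    have hmax : max H 1 = 1 := by omega
    rw [hmax, solveLoop, dif_neg (by omega)]
    decide

-- ===== VERDICT (by name: the statement is the Claim_ definition above) =====
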